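-- pv_equiv track=rewrite | github.com/labgem/pangenomeNEM | src/util.py | exactCombinations
-- ===== SOURCE A (Python) =====
-- from collections import defaultdict
--
-- def exactCombinations(items):
--
--         len_item  = len(items);
--         combinations = defaultdict(list)
--         for i in range(1, 1<<len_item):
--                 c = []
--                 for j in range(0, len_item):
--                         if(i & (1 << j)):
--                                 c.append(items[j])
--                 combinations[len(c)].append(c)
--         return combinations
-- ===== SOURCE B (Python) =====
-- from collections import defaultdict
--
-- def exactCombinations(items):
--     # Build the powerset by doubling: index in `subsets` equals the bitmask.
--     subsets = [[]]
--     for item in items: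
--         subsets = subsets + [s + [item] for s in subsets]
--     combinations = defaultdict(list)
--     for s in subsets[1:]:
--         combinations[len(s)].append(s)
--     return combinations
-- ===== Notes on version B (the rewrite author's own statement) =====
-- stated objective: alternative
-- what changed: Replaces the per-mask bit-testing inner loop (O(n*2^n) bit tests and rebuilds) with an incremental powerset doubling (each subset built by one append from a previous one), then one grouping pass over the subset list.
import Mathlib
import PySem

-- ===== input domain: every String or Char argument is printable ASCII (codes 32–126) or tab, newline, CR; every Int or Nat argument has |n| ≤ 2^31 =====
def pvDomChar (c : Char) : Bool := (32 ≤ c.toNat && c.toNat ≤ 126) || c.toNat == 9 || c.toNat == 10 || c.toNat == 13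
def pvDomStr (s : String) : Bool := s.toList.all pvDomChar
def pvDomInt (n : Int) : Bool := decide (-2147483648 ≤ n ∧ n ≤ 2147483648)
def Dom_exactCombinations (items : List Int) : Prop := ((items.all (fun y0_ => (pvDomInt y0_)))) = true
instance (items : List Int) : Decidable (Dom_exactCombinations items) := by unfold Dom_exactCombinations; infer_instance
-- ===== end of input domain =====

-- B replaces A's per-mask bit-testing loops by incremental powerset doubling plus one grouping pass (alternative decomposition, same result).

-- ===== PORT A =====
-- i & (1 << j) is PySem.Int.band / Lean's <<< (j ≥ 0 throughout); items[j] with 0 ≤ j < len is pyGetD.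
def exactCombinations (items : List Int) : List (Int × List (List Int)) :=
  ((PySem.List.pyRange 1 ((1 : Int) <<< ((items.length : Int)).toNat) 1).foldl (fun d i =>
      let c : List Int :=
        (PySem.List.pyRange 0 (items.length : Int) 1).foldl (fun c j =>
          if PySem.Int.band i ((1 : Int) <<< j.toNat) ≠ 0 then
            c ++ [PySem.List.pyGetD items j 0]
          else c) []
      d.modify (c.length : Int) [] (fun l => l ++ [c]))
    (PySem.Dict.empty : PySem.Dict Int (List (List Int)))).items

-- ===== PORT B =====
def exactCombinations_alt (items : List Int) : List (Int × List (List Int)) :=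
  (((items.foldl (fun acc x => acc ++ acc.map (fun s => s ++ [x])) [[]]).drop 1).foldl
    (fun d s => d.modify (s.length : Int) [] (fun l => l ++ [s]))
    (PySem.Dict.empty : PySem.Dict Int (List (List Int)))).items

-- ===== PRECONDITION & SPEC =====
def Spec_exactCombinations (items : List Int) (out : List (Int × List (List Int))) : Prop := out = exactCombinations_alt items
instance (items : List Int) (out : List (Int × List (List Int))) : Decidable (Spec_exactCombinations items out) := by unfold Spec_exactCombinations; infer_instance

-- ===== CLAIM (what is proved, stated in full; the proofs are below) =====
def Claim_equal_exactCombinations : Prop := ∀ (items : List Int), Dom_exactCombinations items → Spec_exactCombinations items (exactCombinations items)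

-- ===== LEMMAS AND PROOFS =====

/-- The subset A builds for mask `m`, phrased over `Nat`. -/
def pvMaskSub (items : List Int) (m : Nat) : List Int :=
  (List.range items.length).foldl (fun c j => if m.testBit j then c ++ [items.getD j 0] else c) []

/-- B's doubling accumulator. -/
def pvDouble (items : List Int) : List (List Int) :=
  items.foldl (fun acc x => acc ++ acc.map (fun s => s ++ [x])) [[]]

lemma pvMaskSub_low (xs : List Int) (x : Int) (m : Nat) (hm : m < 2 ^ xs.length) :
    pvMaskSub (xs ++ [x]) m = pvMaskSub xs m := by
  unfold pvMaskSub
  rw [List.length_append, List.length_singleton, List.range_succ, List.foldl_append]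
  simp only [List.foldl_cons, List.foldl_nil, Nat.testBit_lt_two_pow hm, Bool.false_eq_true,
    if_false]
  exact PySem.List.foldl_congr_mem _ _ _ _ (fun c j hj => by
    rw [List.getD_append _ _ _ _ (List.mem_range.mp hj)])

lemma pvMaskSub_high (xs : List Int) (x : Int) (m : Nat) (hm : m < 2 ^ xs.length) :
    pvMaskSub (xs ++ [x]) (2 ^ xs.length + m) = pvMaskSub xs m ++ [x] := by
  unfold pvMaskSub
  rw [List.length_append, List.length_singleton, List.range_succ, List.foldl_append]
  have htop : Nat.testBit (2 ^ xs.length + m) xs.length = true := by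
    rw [Nat.testBit_two_pow_add_eq, Nat.testBit_lt_two_pow hm]; rfl
  have hbody : (List.range xs.length).foldl
      (fun c j => if Nat.testBit (2 ^ xs.length + m) j then c ++ [(xs ++ [x]).getD j 0] else c) [] =
      (List.range xs.length).foldl (fun c j => if Nat.testBit m j then c ++ [xs.getD j 0] else c) [] :=
    PySem.List.foldl_congr_mem _ _ _ _ (fun c j hj => by
      have hjlt : j < xs.length := List.mem_range.mp hj
      rw [Nat.testBit_two_pow_add_gt hjlt, List.getD_append _ _ _ _ hjlt])
  simp only [List.foldl_cons, List.foldl_nil, htop, if_true, hbody]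
  simp

/-- Doubling equals the mask enumeration in binary-counting order. -/
lemma pvDouble_eq_map_maskSub (items : List Int) :
    pvDouble items = (List.range (2 ^ items.length)).map (pvMaskSub items) := by
  induction items using List.reverseRecOn with
  | nil => simp [pvDouble, pvMaskSub]
  | append_singleton xs x ih =>
    rw [List.length_append, List.length_singleton, pow_succ,
        show 2 ^ xs.length * 2 = 2 ^ xs.length + 2 ^ xs.length from by ring, List.range_add]
    unfold pvDouble at ih ⊢
    rw [List.foldl_append, ih, List.foldl_cons, List.foldl_nil, List.map_append, List.map_map,
        List.map_map]
    congr 1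
    · exact List.map_congr_left fun m hm =>
        (pvMaskSub_low xs x m (List.mem_range.mp hm)).symm
    · exact List.map_congr_left fun m hm =>
        (pvMaskSub_high xs x m (List.mem_range.mp hm)).symm

/-- A's inner loop computes `pvMaskSub` at the mask's `Nat` value. -/
lemma pvInner_eq_maskSub (items : List Int) (m : Nat) :
    (PySem.List.pyRange 0 (items.length : Int) 1).foldl (fun c j =>
      if PySem.Int.band (m : Int) ((1 : Int) <<< j.toNat) ≠ 0 then
        c ++ [PySem.List.pyGetD items j 0]
      else c) [] = pvMaskSub items m := by
  unfold pvMaskSub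
  rw [PySem.List.pyRange_zero_nat, List.foldl_map]
  refine PySem.List.foldl_congr_mem _ _ _ _ (fun c j hj => ?_)
  simp only [Int.toNat_natCast, Int.one_shiftLeft, PySem.Int.band_natCast,
    PySem.List.pyGetD_natCast, ne_eq, Nat.cast_eq_zero, Nat.and_two_pow]
  cases h : m.testBit j <;> simp_all

lemma pvRange_one_eq (items : List Int) :
    PySem.List.pyRange 1 ((1 : Int) <<< ((items.length : Int)).toNat) 1
      = ((List.range (2 ^ items.length)).drop 1).map (fun m : Nat => (m : Int)) := by
  have h2n : (0 : Nat) < 2 ^ items.length := Nat.two_pow_pos _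
  rw [show ((items.length : Int)).toNat = items.length from Int.toNat_natCast _,
      show ((1 : Int) <<< items.length) = ((2 ^ items.length : Nat) : Int) from by
        simp [Int.shiftLeft_eq]]
  have h := PySem.List.pyRange_one_cons (a := 0) (b := ((2 ^ items.length : Nat) : Int))
    (by exact_mod_cast h2n)
  rw [PySem.List.pyRange_zero_nat] at h
  cases hr : List.range (2 ^ items.length) with
  | nil => exact absurd (hr ▸ List.length_range ..) (by simp; omega)
  | cons a as =>
    rw [hr, List.map_cons] at h
    injection h with h1 h2
    simpa using h2.symm

-- ===== VERDICT (by name: the statement is the Claim_ definition above) =====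
theorem exactCombinations_spec : Claim_equal_exactCombinations := by
  intro items _
  unfold Spec_exactCombinations exactCombinations exactCombinations_alt
  rw [pvRange_one_eq, List.foldl_map,
      show items.foldl (fun acc x => acc ++ acc.map (fun s => s ++ [x])) [[]] = pvDouble items
        from rfl,
      pvDouble_eq_map_maskSub, ← List.map_drop, List.foldl_map]
  congr 1
  refine PySem.List.foldl_congr_mem _ _ _ _ (fun d m hm => ?_)
  simp only [pvInner_eq_maskSub]
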